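-- pv_equiv track=rewrite | github.com/MrBrantCode/unitest_baseline | mut_generate/mist_train_cf/cf_94471/solution.py | get_unique_combinations
-- ===== SOURCE A (Python) =====
-- def get_unique_combinations(string):
--     def backtrack(comb, start):
--         res.append(comb)
--         for i in range(start, len(string)):
--             if i > start and string[i] == string[i-1]:
--                 continue
--             backtrack(comb + string[i], i + 1)
--
--     res = []
--     string = ''.join(sorted(string))
--     backtrack("", 0)
--     return res
-- ===== SOURCE B (Python) =====
-- def get_unique_combinations(string):
--     subs = {""}
--     for ch in sorted(string):
--         subs |= {s + ch for s in subs}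
--     return sorted(subs)
-- ===== Notes on version B (the rewrite author's own statement) =====
-- stated objective: alternative
-- what changed: Replaces the recursive dedup backtracking with an iterative subset-closure: fold over the sorted characters growing a set of distinct subsequences, then sort the set; A's preorder over the sorted string is exactly the lexicographically sorted list of distinct subsequences.
import Mathlib
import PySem

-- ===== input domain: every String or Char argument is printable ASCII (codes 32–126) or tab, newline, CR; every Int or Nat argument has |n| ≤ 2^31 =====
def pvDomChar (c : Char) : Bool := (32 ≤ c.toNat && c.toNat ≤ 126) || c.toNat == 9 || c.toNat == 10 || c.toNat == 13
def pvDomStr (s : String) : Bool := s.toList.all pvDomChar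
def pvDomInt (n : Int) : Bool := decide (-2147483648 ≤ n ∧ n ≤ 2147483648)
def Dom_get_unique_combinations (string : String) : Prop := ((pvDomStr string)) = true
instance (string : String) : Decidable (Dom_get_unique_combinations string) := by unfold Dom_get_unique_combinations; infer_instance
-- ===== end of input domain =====

-- B replaces A's recursive dedup backtracking by an iterative subset-closure over the sorted
-- characters followed by one sort (alternative decomposition, similar cost).

-- ===== PORT A =====
-- A's inner `backtrack(comb, start)` walks indices start..len-1 of the sorted string, skipping
-- i with i>start and string[i]==string[i-1]; it is rendered exactly with the remaining suffix
-- `l` = string[start:] plus `prev` = the character string[i-1] just before the loop position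
-- (none at i=start), and the `res.append` accumulator as the emitted list, in emission order.
mutual
def pvBtk (comb : List Char) (l : List Char) : List (List Char) :=
  comb :: pvBtkFor comb l none
termination_by 2 * l.length + 1
decreasing_by omega

def pvBtkFor (comb : List Char) (l : List Char) (prev : Option Char) : List (List Char) :=
  match l with
  | [] => []
  | c :: rest =>
    (if prev = some c then [] else pvBtk (comb ++ [c]) rest) ++ pvBtkFor comb rest (some c)
termination_by 2 * l.length
decreasing_by all_goals (simp only [List.length_cons]; omega)
end

def get_unique_combinations (string : String) : List String :=
  (pvBtk [] (PySem.List.sorted string.toList (fun c => c) false)).map String.ofList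

-- ===== PORT B =====
-- Source B: subs = {""}; for ch in sorted(string): subs |= {s + ch for s in subs}; return sorted(subs).
-- Strings are carried as their character lists (String.ofList at the end); sorting the character
-- lists lexicographically is Python's sort of the strings (code-point lexicographic order).
def get_unique_combinations_alt (string : String) : List String :=
  let subs := (PySem.List.sorted string.toList (fun c => c) false).foldl
      (fun subs ch => PySem.Set.union subs (subs.map (fun t => t ++ [ch])))
      (PySem.Set.ofList [([] : List Char)])
  (PySem.List.sorted subs (fun t => t) false).map String.ofList

-- ===== PRECONDITION & SPEC =====
def Spec_get_unique_combinations (string : String) (out : List String) : Prop := out = get_unique_combinations_alt string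
instance (string : String) (out : List String) : Decidable (Spec_get_unique_combinations string out) := by unfold Spec_get_unique_combinations; infer_instance

-- ===== CLAIM (what is proved, stated in full; the proofs are below) =====
def Claim_equal_get_unique_combinations : Prop := ∀ (string : String), Dom_get_unique_combinations string → Spec_get_unique_combinations string (get_unique_combinations string)

-- ===== LEMMAS AND PROOFS =====

-- Membership in A's loop output: heads are characters of l that differ from `prev`.
lemma mem_pvBtkFor (l : List Char) (comb : List Char) (prev : Option Char) (x : List Char)
    (hs : l.Pairwise (· ≤ ·)) (hp : ∀ p, prev = some p → ∀ c ∈ l, p ≤ c) :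
    x ∈ pvBtkFor comb l prev ↔
      ∃ c t, List.Sublist (c :: t) l ∧ x = comb ++ c :: t ∧ prev ≠ some c := by
  induction l generalizing comb prev with
  | nil => simp [pvBtkFor]
  | cons c rest ih =>
    rcases List.pairwise_cons.mp hs with ⟨hc, hs'⟩
    rw [pvBtkFor]
    rw [List.mem_append]
    constructor
    · rintro (hx | hx)
      · by_cases hpc : prev = some c
        · rw [if_pos hpc] at hx; simp at hx
        · rw [if_neg hpc, pvBtk, List.mem_cons] at hx
          rcases hx with rfl | hx
          · exact ⟨c, [], List.cons_sublist_cons.mpr (List.nil_sublist rest), rfl, hpc⟩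
          · obtain ⟨c', t', hsub, rfl, -⟩ :=
              (ih (comb ++ [c]) none hs' (by simp)).mp hx
            exact ⟨c, c' :: t', List.cons_sublist_cons.mpr hsub, by simp, hpc⟩
      · obtain ⟨c', t', hsub, rfl, hne⟩ :=
          (ih comb (some c) hs' (by intro p hp' d hd; injection hp' with h; exact h ▸ hc d hd)).mp hx
        have hc' : c' ∈ rest := hsub.subset (List.mem_cons_self)
        refine ⟨c', t', hsub.cons c, rfl, ?_⟩
        intro hpc'
        have h1 : c ≤ c' := hc c' hc'
        have h2 : c' ≤ c := hp c' hpc' c List.mem_cons_self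
        exact hne (congrArg some (le_antisymm h1 h2))
    · rintro ⟨c', t', hsub, rfl, hne⟩
      rcases List.sublist_cons_iff.mp hsub with hsub' | ⟨r, heq, hr⟩
      · by_cases hcc : c' = c
        · subst hcc
          left
          rw [if_neg hne, pvBtk, List.mem_cons]
          cases t' with
          | nil => left; simp
          | cons d u =>
            right
            refine (ih (comb ++ [c']) none hs' (by simp)).mpr ?_
            exact ⟨d, u, ((List.sublist_cons_self c' (d :: u)).trans hsub'), by simp, by simp⟩
        · right
          exact (ih comb (some c) hs' (by intro p hp' d hd; injection hp' with h; exact h ▸ hc d hd)).mpr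
            ⟨c', t', hsub', rfl, by simp [Ne.symm hcc]⟩
      · obtain ⟨rfl, rfl⟩ : c' = c ∧ t' = r := by
          injection heq with h1 h2; exact ⟨h1, h2 ▸ rfl⟩
        left
        rw [if_neg hne, pvBtk, List.mem_cons]
        cases t' with
        | nil => left; simp
        | cons d u =>
          right
          refine (ih (comb ++ [c']) none hs' (by simp)).mpr ?_
          exact ⟨d, u, hr, by simp, by simp⟩

lemma mem_pvBtk (l : List Char) (comb : List Char) (x : List Char)
    (hs : l.Pairwise (· ≤ ·)) :
    x ∈ pvBtk comb l ↔ ∃ t, List.Sublist t l ∧ x = comb ++ t := by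
  rw [pvBtk, List.mem_cons, mem_pvBtkFor l comb none x hs (by simp)]
  constructor
  · rintro (rfl | ⟨c, t, hsub, rfl, -⟩)
    · exact ⟨[], List.nil_sublist l, by simp⟩
    · exact ⟨c :: t, hsub, rfl⟩
  · rintro ⟨t, hsub, rfl⟩
    cases t with
    | nil => left; simp
    | cons c u => right; exact ⟨c, u, hsub, rfl, by simp⟩

-- a list is lexicographically below any proper extension, and below a divergence to a larger character
lemma lt_append_cons (comb t : List Char) (c : Char) : comb < comb ++ c :: t := by
  have h : List.Lex (· < ·) (comb ++ []) (comb ++ c :: t) := List.Lex.append_left _ List.Lex.nil comb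
  simpa using h

lemma lt_append_lt (comb u v : List Char) (a b : Char) (h : a < b) :
    comb ++ a :: u < comb ++ b :: v :=
  List.Lex.append_left _ (List.Lex.rel h) comb

lemma pairwise_pvBtkFor (l : List Char) (comb : List Char) (prev : Option Char)
    (hs : l.Pairwise (· ≤ ·)) (hp : ∀ p, prev = some p → ∀ c ∈ l, p ≤ c) :
    (pvBtkFor comb l prev).Pairwise (· < ·) := by
  induction l generalizing comb prev with
  | nil => simp [pvBtkFor]
  | cons c rest ih =>
    rcases List.pairwise_cons.mp hs with ⟨hc, hs'⟩
    rw [pvBtkFor, List.pairwise_append]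
    refine ⟨?_, ih comb (some c) hs'
      (by intro p hp' d hd; injection hp' with h; exact h ▸ hc d hd), ?_⟩
    · by_cases hpc : prev = some c
      · simp [hpc]
      · rw [if_neg hpc, pvBtk, List.pairwise_cons]
        refine ⟨?_, ih (comb ++ [c]) none hs' (by simp)⟩
        intro y hy
        obtain ⟨c', t', hsub, rfl, -⟩ :=
          (mem_pvBtkFor rest (comb ++ [c]) none y hs' (by simp)).mp hy
        exact lt_append_cons (comb ++ [c]) t' c'
    · intro x hx y hy
      by_cases hpc : prev = some c
      · rw [if_pos hpc] at hx; simp at hx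
      · rw [if_neg hpc] at hx
        obtain ⟨t, hsubt, rfl⟩ := (mem_pvBtk rest (comb ++ [c]) x hs').mp hx
        obtain ⟨c', v, hsubv, rfl, hnec⟩ :=
          (mem_pvBtkFor rest comb (some c) y hs'
            (by intro p hp' d hd; injection hp' with h; exact h ▸ hc d hd)).mp hy
        have hc' : c' ∈ rest := hsubv.subset List.mem_cons_self
        have hlt : c < c' :=
          lt_of_le_of_ne (hc c' hc') (fun h => hnec (congrArg some h))
        have hgoal : comb ++ c :: t < comb ++ c' :: v := lt_append_lt comb t v c c' hlt
        simpa using hgoal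

lemma pairwise_pvBtk (l : List Char) (comb : List Char) (hs : l.Pairwise (· ≤ ·)) :
    (pvBtk comb l).Pairwise (· < ·) := by
  rw [pvBtk, List.pairwise_cons]
  refine ⟨?_, pairwise_pvBtkFor l comb none hs (by simp)⟩
  intro y hy
  obtain ⟨c, t, -, rfl, -⟩ := (mem_pvBtkFor l comb none y hs (by simp)).mp hy
  exact lt_append_cons comb t c

lemma sublist_snoc_iff (x p : List Char) (c : Char) :
    List.Sublist x (p ++ [c]) ↔ List.Sublist x p ∨ ∃ t, List.Sublist t p ∧ x = t ++ [c] := by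
  constructor
  · intro h
    have h' := h.reverse
    simp only [List.reverse_append, List.reverse_cons, List.reverse_nil, List.nil_append,
      List.singleton_append] at h'
    rcases List.sublist_cons_iff.mp h' with h2 | ⟨r, hx, hr⟩
    · left; simpa using h2.reverse
    · right
      refine ⟨r.reverse, by simpa using hr.reverse, ?_⟩
      have hx' := congrArg List.reverse hx
      simpa using hx'
  · rintro (h | ⟨t, ht, rfl⟩)
    · exact h.trans (List.sublist_append_left p [c])
    · exact ht.append (List.Sublist.refl [c])

-- Membership in B's fold: exactly the sublists of the processed prefix.
lemma mem_pvSubs (p : List Char) (x : List Char) :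
    x ∈ p.foldl (fun subs ch => PySem.Set.union subs (subs.map (fun t => t ++ [ch])))
        (PySem.Set.ofList [([] : List Char)]) ↔ List.Sublist x p := by
  induction p using List.reverseRecOn generalizing x with
  | nil => simp [PySem.Set.mem_ofList]
  | append_singleton p c ih =>
    rw [List.foldl_append, List.foldl_cons, List.foldl_nil, sublist_snoc_iff,
      PySem.Set.mem_union, List.mem_map]
    refine or_congr (ih x) ?_
    constructor
    · rintro ⟨t, htS, rfl⟩; exact ⟨t, (ih t).mp htS, rfl⟩
    · rintro ⟨t, ht, rfl⟩; exact ⟨t, (ih t).mpr ht, rfl⟩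

lemma nodup_pvSubs (p : List Char) :
    (p.foldl (fun subs ch => PySem.Set.union subs (subs.map (fun t => t ++ [ch])))
        (PySem.Set.ofList [([] : List Char)])).Nodup := by
  induction p using List.reverseRecOn with
  | nil => simp [PySem.Set.ofList]
  | append_singleton p c ih =>
    rw [List.foldl_append, List.foldl_cons, List.foldl_nil]
    exact PySem.Set.nodup_union _ _ ih

-- ===== VERDICT (by name: the statement is the Claim_ definition above) =====
theorem get_unique_combinations_spec : Claim_equal_get_unique_combinations := by
  intro string _
  unfold Spec_get_unique_combinations get_unique_combinations get_unique_combinations_alt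
  set s := PySem.List.sorted string.toList (fun c => c) false with hsdef
  have hs : s.Pairwise (· ≤ ·) := by
    simpa using PySem.List.sorted_pairwise string.toList (fun c => c)
  set subs := s.foldl (fun subs ch => PySem.Set.union subs (subs.map (fun t => t ++ [ch])))
      (PySem.Set.ofList [([] : List Char)]) with hsubs
  have hpw : (pvBtk [] s).Pairwise (· < ·) := pairwise_pvBtk s [] hs
  have hperm : (pvBtk [] s).Perm subs := by
    refine (List.perm_ext_iff_of_nodup (hpw.imp (fun h => ne_of_lt h)) (nodup_pvSubs s)).mpr ?_
    intro a
    rw [mem_pvBtk s [] a hs, mem_pvSubs s a]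
    constructor
    · rintro ⟨t, ht, rfl⟩; simpa using ht
    · intro h; exact ⟨a, h, rfl⟩
  have := PySem.List.sorted_eq_of_perm_of_pairwise_lt subs (pvBtk [] s) (fun t => t) hperm (by simpa using hpw)
  refine congrArg (List.map String.ofList) (Eq.symm ?_)
  convert this using 2
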